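-- pv_equiv track=rewrite | github.com/sunjesse/capacities | src/utils.py | disjoint_subset_pairs
-- ===== SOURCE A (Python) =====
-- def disjoint_subset_pairs(mask):
-- 	"""
-- 	Generate all pairs of disjoint
-- 	subsets where the union is mask.
-- 	"""
-- 	ret = set()
-- 	for z in range(1, mask):
-- 		if z | mask == mask:
-- 			if z >= mask ^ z:
-- 				ret.add((z, mask^z))
-- 			else: ret.add((mask^z, z))
-- 	return ret
-- ===== SOURCE B (Python) =====
-- def disjoint_subset_pairs(mask):
--     """
--     Generate all pairs of disjoint
--     subsets where the union is mask.
--     """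
--     ret = set()
--     if mask <= 0:
--         return ret
--     sub = (mask - 1) & mask
--     while sub:
--         if sub > mask ^ sub:
--             ret.add((sub, mask ^ sub))
--         sub = (sub - 1) & mask
--     return ret
-- ===== Notes on version B (the rewrite author's own statement) =====
-- stated objective: faster
-- what changed: B enumerates only the submasks of mask via the standard sub=(sub-1)&mask descent instead of scanning every integer in range(1,mask) and filtering, and it emits each unordered pair exactly once (big element first) so the set never sees a duplicate.
import Mathlib
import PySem

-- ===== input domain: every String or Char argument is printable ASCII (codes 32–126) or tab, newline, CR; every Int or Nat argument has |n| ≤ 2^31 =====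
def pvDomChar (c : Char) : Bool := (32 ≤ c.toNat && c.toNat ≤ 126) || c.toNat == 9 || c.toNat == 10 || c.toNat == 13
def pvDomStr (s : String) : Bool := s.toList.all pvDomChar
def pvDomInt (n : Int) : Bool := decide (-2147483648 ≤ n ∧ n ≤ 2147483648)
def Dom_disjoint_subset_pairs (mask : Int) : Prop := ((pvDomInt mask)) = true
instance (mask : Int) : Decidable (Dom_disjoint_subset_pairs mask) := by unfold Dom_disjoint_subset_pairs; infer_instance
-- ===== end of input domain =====

-- B replaces A's scan of every integer in range(1, mask) by the standard submask descent
-- sub = (sub-1) & mask, visiting only the submasks of mask (objective: faster).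


-- ===== PORT A =====
def disjoint_subset_pairs (mask : Int) : List (List Int) :=
  (PySem.List.pyRange 1 mask 1).foldl
    (fun ret z =>
      if PySem.Int.bor z mask = mask then
        if z ≥ PySem.Int.bxor mask z then PySem.Set.add ret [z, PySem.Int.bxor mask z]
        else PySem.Set.add ret [PySem.Int.bxor mask z, z]
      else ret) []

-- ===== PORT B =====
-- 'while sub: …; sub = (sub - 1) & mask' as fuelled recursion; fuel mask.toNat suffices
-- since sub starts at (mask-1)&mask ≤ mask-1 and strictly decreases each iteration.
def pvAltLoop (mask : Int) : Nat → Int → List (List Int) → List (List Int)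
  | 0, _, ret => ret
  | fuel+1, sub, ret =>
    if sub = 0 then ret
    else pvAltLoop mask fuel (PySem.Int.band (sub - 1) mask)
      (if PySem.Int.bxor mask sub < sub then PySem.Set.add ret [sub, PySem.Int.bxor mask sub]
       else ret)

def disjoint_subset_pairs_alt (mask : Int) : List (List Int) :=
  if mask ≤ 0 then []
  else pvAltLoop mask mask.toNat (PySem.Int.band (mask - 1) mask) []

-- ===== PRECONDITION & SPEC =====
def Spec_disjoint_subset_pairs (mask : Int) (out : List (List Int)) : Prop := out = disjoint_subset_pairs_alt mask
instance (mask : Int) (out : List (List Int)) : Decidable (Spec_disjoint_subset_pairs mask out) := by unfold Spec_disjoint_subset_pairs; infer_instance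

-- ===== CLAIM (what is proved, stated in full; the proofs are below) =====
def Claim_equal_disjoint_subset_pairs : Prop := ∀ (mask : Int), Dom_disjoint_subset_pairs mask → Spec_disjoint_subset_pairs mask (disjoint_subset_pairs mask)

-- ===== LEMMAS AND PROOFS =====

/-! Nat-level bit toolkit. "z is a submask of m" is `z &&& m = z`. -/

theorem pv_and_mod_two (a b : Nat) : (a &&& b) % 2 = a % 2 * (b % 2) := by
  rcases Nat.mod_two_eq_zero_or_one (a &&& b) with hc | hc
  · rcases Nat.mod_two_eq_zero_or_one a with ha | ha <;>
      rcases Nat.mod_two_eq_zero_or_one b with hb | hb <;> rw [hc, ha, hb]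
    exfalso
    have := Nat.and_mod_two_eq_one.mpr ⟨ha, hb⟩
    omega
  · have h := Nat.and_mod_two_eq_one.mp hc
    rw [hc, h.1, h.2]

theorem pv_and_decomp (a b : Nat) :
    a &&& b = 2 * (a / 2 &&& b / 2) + a % 2 * (b % 2) := by
  have h1 := Nat.and_div_two (a := a) (b := b)
  have h2 := pv_and_mod_two a b
  rcases Nat.mod_two_eq_zero_or_one a with ha | ha <;>
    rcases Nat.mod_two_eq_zero_or_one b with hb | hb <;>
    rw [ha, hb] at h2 ⊢ <;> omega

/-- submask parity: if `z` is a submask of `m` then `z % 2 ≤ m % 2`. -/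
theorem pv_mod_le (z m : Nat) (h : z &&& m = z) : z % 2 ≤ m % 2 := by
  have h2 := congrArg (· % 2) h
  simp only [pv_and_mod_two] at h2
  rcases Nat.mod_two_eq_zero_or_one z with hz | hz <;>
    rcases Nat.mod_two_eq_zero_or_one m with hm | hm <;>
    rw [hz, hm] at h2 <;> omega

/-- halving preserves the submask property. -/
theorem pv_div_two (z m : Nat) (h : z &&& m = z) : z / 2 &&& m / 2 = z / 2 := by
  have := congrArg (· / 2) h
  simpa [Nat.and_div_two] using this

theorem pv_or_iff (z m : Nat) : z ||| m = m ↔ z &&& m = z := by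
  constructor <;> intro h <;> refine Nat.eq_of_testBit_eq fun i => ?_ <;>
    have h' := congrArg (fun x => Nat.testBit x i) h <;>
    simp only [Nat.testBit_or, Nat.testBit_and] at h' ⊢ <;>
    revert h' <;> cases hz : z.testBit i <;> cases hmi : m.testBit i <;> simp

theorem pv_sub (m : Nat) : ∀ z, z &&& m = z → z ≤ m ∧ m ^^^ z = m - z := by
  induction m using Nat.strong_induction_on with
  | _ m ih =>
    intro z h
    rcases Nat.eq_zero_or_pos m with hm | hm
    · subst hm; simp_all
    · have hIH := ih (m / 2) (by omega) (z / 2) (pv_div_two z m h)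
      have hmod := pv_mod_le z m h
      have hx1 : (m ^^^ z) / 2 = m / 2 ^^^ z / 2 := Nat.xor_div_two
      have hx2 : (m ^^^ z) % 2 = (m + z) % 2 := Nat.xor_mod_two_eq
      omega

/-- the key step fact: every submask `z < s` (for `s` a nonzero submask) satisfies
`z ≤ (s-1) & m`, i.e. `(s-1) & m` is the next submask below `s`. -/
theorem pv_next (m : Nat) : ∀ s z, s &&& m = s → z &&& m = z → 0 < s → z < s →
    z ≤ (s - 1) &&& m := by
  induction m using Nat.strong_induction_on with
  | _ m ih =>
    intro s z hs hz h0 hlt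
    have hsd := pv_div_two s m hs
    have hsm := pv_mod_le s m hs
    have hzm := pv_mod_le z m hz
    have hs2 := Nat.mod_two_eq_zero_or_one s
    have hz2 := Nat.mod_two_eq_zero_or_one z
    have hm2 := Nat.mod_two_eq_zero_or_one m
    rcases hs2 with hodd | hodd
    · -- s even and positive, so s/2 > 0; recurse on the halves
      rcases Nat.eq_zero_or_pos m with hm0 | hm0
      · rw [hm0, Nat.and_zero] at hs; omega
      have hIH := ih (m / 2) (by omega) (s / 2) (z / 2) hsd (pv_div_two z m hz)
        (by omega) (by omega)
      have hdec := pv_and_decomp (s - 1) m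
      have h12 : (s - 1) / 2 = s / 2 - 1 := by omega
      have h22 : (s - 1) % 2 = 1 := by omega
      rw [h12, h22, one_mul] at hdec
      omega
    · -- s odd: (s-1) & m = s - 1
      have hdec := pv_and_decomp (s - 1) m
      have h12 : (s - 1) / 2 = s / 2 := by omega
      have h22 : (s - 1) % 2 = 0 := by omega
      rw [h12, h22, hsd, Nat.zero_mul] at hdec
      omega

theorem pv_compl (m z : Nat) (h : z &&& m = z) : (m ^^^ z) &&& m = m ^^^ z := by
  rw [Nat.and_xor_distrib_right, Nat.and_self, h]

theorem pv_invol (m z : Nat) : m ^^^ (m ^^^ z) = z := Nat.xor_xor_cancel_left m z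

theorem pv_ne_compl (m z : Nat) (hm : 0 < m) : m ^^^ z ≠ z := by
  intro h
  have h2 : m = z ^^^ z := by
    have := congrArg (· ^^^ z) h
    simpa [Nat.xor_xor_cancel_right] using this
  simp [Nat.xor_self] at h2
  omega

/-! the Bool filters and the pair constructor -/

def pvSmall (m z : Nat) : Bool := (z &&& m == z) && decide (z < m ^^^ z)
def pvBig (m z : Nat) : Bool := (z &&& m == z) && decide (m ^^^ z < z)
def pvPair (m z : Nat) : List Int := [(z : Int), ((m ^^^ z : Nat) : Int)]

/-! ### B side: the descent visits exactly the submasks, in descending order -/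

theorem pv_filter_range_eq (m s : Nat) (hs : s &&& m = s) (h0 : 0 < s) :
    (List.range s).filter (pvBig m) = (List.range (((s - 1) &&& m) + 1)).filter (pvBig m) := by
  set t := (s - 1) &&& m with ht
  have hts : t ≤ s - 1 := Nat.and_le_left
  have hsplit : List.range s = List.range (t + 1) ++ (List.range (s - (t + 1))).map (t + 1 + ·) := by
    have h := List.range_add (n := t + 1) (m := s - (t + 1))
    rwa [show (t + 1) + (s - (t + 1)) = s from by omega] at h
  rw [hsplit, List.filter_append]
  have hnil : ((List.range (s - (t + 1))).map (t + 1 + ·)).filter (pvBig m) = [] := by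
    rw [List.filter_eq_nil_iff]
    intro x hx
    simp only [List.mem_map, List.mem_range] at hx
    obtain ⟨k, hk, rfl⟩ := hx
    simp only [pvBig, Bool.and_eq_true, beq_iff_eq, decide_eq_true_eq, not_and]
    intro hsub _
    have := pv_next m s (t + 1 + k) hs hsub h0 (by omega)
    omega
  rw [hnil, List.append_nil]

theorem pv_altLoop_inv (m : Nat) : ∀ (fuel s : Nat) (ret : List (List Int)),
    s &&& m = s → s < fuel →
    (∀ t : Nat, t ≤ s → pvPair m t ∉ ret) →
    pvAltLoop (↑m) fuel (↑s) ret
      = ret ++ (((List.range (s + 1)).filter (pvBig m)).reverse).map (pvPair m) := by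
  intro fuel
  induction fuel with
  | zero => intro s ret _ h; omega
  | succ fuel ih =>
    intro s ret hs hf hret
    rcases Nat.eq_zero_or_pos s with h0 | h0
    · subst h0
      have hb0 : pvBig m 0 = false := by simp [pvBig]
      simp [pvAltLoop, List.filter, hb0]
    · have hs0 : ((s : Int)) ≠ 0 := by omega
      rw [pvAltLoop, if_neg hs0]
      rw [show ((s : Int)) - 1 = ((s - 1 : Nat) : Int) from by omega,
        PySem.Int.band_natCast, PySem.Int.bxor_natCast]
      set t := (s - 1) &&& m with htdef
      have hts : t ≤ s - 1 := Nat.and_le_left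
      have htsub : t &&& m = t := by rw [htdef, Nat.and_assoc, Nat.and_self]
      have hcond : (((m ^^^ s : Nat) : Int) < (s : Int)) ↔ m ^^^ s < s := by exact_mod_cast Iff.rfl
      have hnewret : (if ((m ^^^ s : Nat) : Int) < (s : Int)
            then PySem.Set.add ret [((s : Nat) : Int), ((m ^^^ s : Nat) : Int)] else ret)
          = ret ++ (if pvBig m s then [pvPair m s] else []) := by
        by_cases hbs : m ^^^ s < s
        · have hret' : [((s : Nat) : Int), ((m ^^^ s : Nat) : Int)] ∉ ret := by
            have := hret s le_rfl
            simpa [pvPair] using this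
          rw [if_pos (hcond.mpr hbs), PySem.Set.add_of_not_mem hret']
          have hb : pvBig m s = true := by
            simp only [pvBig, Bool.and_eq_true, beq_iff_eq, decide_eq_true_eq]
            exact ⟨hs, hbs⟩
          rw [hb, if_pos rfl]
          rfl
        · rw [if_neg (fun h => hbs (hcond.mp h))]
          have hb : pvBig m s = false := by
            simp only [pvBig, Bool.and_eq_false_iff, decide_eq_false_iff_not]
            exact Or.inr hbs
          rw [hb]
          simp
      rw [hnewret]
      have hnewpre : ∀ u : Nat, u ≤ t →
          pvPair m u ∉ ret ++ (if pvBig m s then [pvPair m s] else []) := by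
        intro u hu
        simp only [List.mem_append, not_or]
        refine ⟨hret u (by omega), ?_⟩
        intro hmem
        have heq : pvPair m u = pvPair m s := by
          rcases Bool.eq_false_or_eq_true (pvBig m s) with h | h <;> rw [h] at hmem <;>
            simp at hmem
          exact hmem
        have : (u : Int) = (s : Int) := by
          simpa [pvPair] using congrArg (fun l => l.headI) heq
        omega
      rw [ih t _ htsub (by omega) hnewpre]
      have hfilter : (List.range (s + 1)).filter (pvBig m)
          = (List.range (t + 1)).filter (pvBig m) ++ (if pvBig m s then [s] else []) := by
        rw [List.range_succ, List.filter_append, pv_filter_range_eq m s hs h0, ← htdef]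
        cases hb : pvBig m s <;> simp [List.filter, hb]
      rw [hfilter]
      rcases Bool.eq_false_or_eq_true (pvBig m s) with h | h <;>
        simp [h, List.reverse_append]

theorem pvB_eq (m : Nat) (hm : 0 < m) :
    disjoint_subset_pairs_alt (↑m)
      = (((List.range m).filter (pvBig m)).reverse).map (pvPair m) := by
  unfold disjoint_subset_pairs_alt
  rw [if_neg (by omega : ¬ ((m : Int) ≤ 0)), Int.toNat_natCast,
    show ((m : Int) - 1) = ((m - 1 : Nat) : Int) from by omega, PySem.Int.band_natCast]
  have hle : (m - 1) &&& m ≤ m - 1 := Nat.and_le_left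
  rw [pv_altLoop_inv m m ((m - 1) &&& m) []
    (by rw [Nat.and_assoc, Nat.and_self]) (by omega) (by simp)]
  rw [← pv_filter_range_eq m m (Nat.and_self m) hm]
  simp

/-! ### A side: the fold over range(1, mask) with set dedup -/

def pvGA (m : Nat) (ret : List (List Int)) (z : Nat) : List (List Int) :=
  if z ||| m = m then
    if m ^^^ z ≤ z then PySem.Set.add ret [(z : Int), ((m ^^^ z : Nat) : Int)]
    else PySem.Set.add ret [((m ^^^ z : Nat) : Int), (z : Int)]
  else ret

theorem pv_foldA_inv (m : Nat) (hm : 0 < m) : ∀ k, k < m →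
    (List.range' 1 k).foldl (pvGA m) []
      = ((List.range' 1 k).filter (pvSmall m)).map (fun z => [((m ^^^ z : Nat) : Int), (z : Int)]) := by
  intro k
  induction k with
  | zero => intro _; simp
  | succ k ih =>
    intro hk
    rw [List.range'_1_concat, List.foldl_append, List.filter_append, List.map_append,
      ih (by omega), List.foldl_cons, List.foldl_nil]
    set z := 1 + k with hzdef
    have hz1 : 1 ≤ z := by omega
    have hzm : z < m := by omega
    by_cases hsub : z ||| m = m
    · have hzsub : z &&& m = z := (pv_or_iff z m).mp hsub
      have hwsub : (m ^^^ z) &&& m = m ^^^ z := pv_compl m z hzsub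
      have hne : m ^^^ z ≠ z := pv_ne_compl m z hm
      have hw0 : m ^^^ z ≠ 0 := by
        intro h; exact absurd (Nat.xor_eq_zero_iff.mp h).symm (by omega)
      by_cases hge : m ^^^ z ≤ z
      · -- z is the big element: its pair was already inserted when its complement was seen
        have hlt : m ^^^ z < z := by omega
        have hmem : [(z : Int), ((m ^^^ z : Nat) : Int)]
            ∈ ((List.range' 1 k).filter (pvSmall m)).map
              (fun w => [((m ^^^ w : Nat) : Int), (w : Int)]) := by
          refine List.mem_map.mpr ⟨m ^^^ z, List.mem_filter.mpr ⟨?_, ?_⟩, ?_⟩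
          · exact List.mem_range'_1.mpr ⟨by omega, by omega⟩
          · simp only [pvSmall, Bool.and_eq_true, beq_iff_eq, decide_eq_true_eq]
            exact ⟨hwsub, by rw [pv_invol]; omega⟩
          · rw [pv_invol]
        rw [pvGA, if_pos hsub, if_pos hge, PySem.Set.add_of_mem hmem]
        have hsmall : pvSmall m z = false := by simp [pvSmall]; omega
        simp [hsmall]
      · -- z is the small element: a fresh pair is appended
        have hlt : z < m ^^^ z := by omega
        have hnotmem : [((m ^^^ z : Nat) : Int), (z : Int)]
            ∉ ((List.range' 1 k).filter (pvSmall m)).map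
              (fun w => [((m ^^^ w : Nat) : Int), (w : Int)]) := by
          intro hmem
          obtain ⟨w, hwmem, heq⟩ := List.mem_map.mp hmem
          have hw : (w : Int) = (z : Int) := by
            simpa using congrArg (fun l => l.getLast?) heq
          have hwk : w < 1 + k := (List.mem_range'_1.mp (List.mem_filter.mp hwmem).1).2
          omega
        rw [pvGA, if_pos hsub, if_neg hge, PySem.Set.add_of_not_mem hnotmem]
        have hsmall : pvSmall m z = true := by simp [pvSmall, hzsub]; omega
        simp [hsmall]
    · rw [pvGA, if_neg hsub]
      have hsmall : pvSmall m z = false := by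
        simp only [pvSmall, Bool.and_eq_false_iff]
        left
        simpa using fun h => hsub ((pv_or_iff z m).mpr h)
      simp [hsmall]

theorem pvA_eq (m : Nat) (hm : 0 < m) :
    disjoint_subset_pairs (↑m)
      = ((List.range' 1 (m - 1)).filter (pvSmall m)).map
          (fun z => [((m ^^^ z : Nat) : Int), (z : Int)]) := by
  unfold disjoint_subset_pairs
  rw [PySem.List.pyRange_one, show ((m : Int) - 1).toNat = m - 1 from by omega, List.foldl_map]
  have hconv : (List.range' 1 (m - 1)).foldl (pvGA m) []
      = (List.range (m - 1)).foldl (fun ret k => pvGA m ret (1 + k)) [] := by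
    rw [List.range'_eq_map_range]
    exact List.foldl_map
  refine Eq.trans (PySem.List.foldl_congr_mem _ _ (fun ret k => pvGA m ret (1 + k)) _ ?_) ?_
  · intro acc k _
    rw [show (1 : Int) + (k : Nat) = ((1 + k : Nat) : Int) from by push_cast; ring]
    simp only [pvGA, PySem.Int.bor_natCast, PySem.Int.bxor_natCast, Nat.cast_inj,
      ge_iff_le, Nat.cast_le]
  · rw [← hconv]
    exact pv_foldA_inv m hm (m - 1) (by omega)

/-! ### the bridge: A's ascending small-element order is B's descending big-element order -/

theorem pv_eq_of_mem_iff {l₁ l₂ : List Nat} (h₁ : l₁.Pairwise (· < ·))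
    (h₂ : l₂.Pairwise (· < ·)) (h : ∀ x, x ∈ l₁ ↔ x ∈ l₂) : l₁ = l₂ := by
  have hn₁ : l₁.Nodup := h₁.imp (fun hab => Nat.ne_of_lt hab)
  have hn₂ : l₂.Nodup := h₂.imp (fun hab => Nat.ne_of_lt hab)
  exact List.Perm.eq_of_pairwise (fun a b _ _ h1 h2 => Nat.le_antisymm h1 h2)
    (h₁.imp (fun hab => Nat.le_of_lt hab)) (h₂.imp (fun hab => Nat.le_of_lt hab))
    ((List.perm_ext_iff_of_nodup hn₁ hn₂).mpr h)

theorem pv_bridge (m : Nat) (hm : 0 < m) :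
    ((List.range' 1 (m - 1)).filter (pvSmall m)).map
        (fun z => [((m ^^^ z : Nat) : Int), (z : Int)])
      = (((List.range m).filter (pvBig m)).reverse).map (pvPair m) := by
  have hnat : (((List.range' 1 (m - 1)).filter (pvSmall m)).map (fun z => m ^^^ z)).reverse
      = (List.range m).filter (pvBig m) := by
    apply pv_eq_of_mem_iff
    · rw [List.pairwise_reverse, List.pairwise_map]
      refine List.Pairwise.imp_of_mem ?_ ((List.pairwise_lt_range' (s := 1) (n := m - 1)).filter _)
      intro a b ha hb hab
      have hsa : a &&& m = a := by
        have := (List.mem_filter.mp ha).2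
        simp only [pvSmall, Bool.and_eq_true, beq_iff_eq] at this
        exact this.1
      have hsb : b &&& m = b := by
        have := (List.mem_filter.mp hb).2
        simp only [pvSmall, Bool.and_eq_true, beq_iff_eq] at this
        exact this.1
      have h1 := pv_sub m a hsa
      have h2 := pv_sub m b hsb
      omega
    · exact List.Pairwise.filter _ List.pairwise_lt_range
    · intro x
      simp only [List.mem_reverse, List.mem_map, List.mem_filter, List.mem_range'_1,
        List.mem_range, pvSmall, pvBig, Bool.and_eq_true, beq_iff_eq, decide_eq_true_eq]
      constructor
      · rintro ⟨z, ⟨⟨hz1, hz2⟩, hzs, hzlt⟩, rfl⟩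
        have hsub := pv_sub m z hzs
        refine ⟨by omega, pv_compl m z hzs, ?_⟩
        rw [pv_invol]; omega
      · rintro ⟨hxm, hxs, hxlt⟩
        refine ⟨m ^^^ x, ⟨⟨?_, ?_⟩, pv_compl m x hxs, by rw [pv_invol]; omega⟩, pv_invol m x⟩
        · rcases Nat.eq_zero_or_pos (m ^^^ x) with h0 | h0
          · exact absurd (Nat.xor_eq_zero_iff.mp h0) (by omega)
          · omega
        · omega
  have hX : ((List.range' 1 (m - 1)).filter (pvSmall m)).map (fun z => m ^^^ z)
      = ((List.range m).filter (pvBig m)).reverse := by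
    rw [← hnat, List.reverse_reverse]
  calc ((List.range' 1 (m - 1)).filter (pvSmall m)).map
        (fun z => [((m ^^^ z : Nat) : Int), (z : Int)])
      = (((List.range' 1 (m - 1)).filter (pvSmall m)).map (fun z => m ^^^ z)).map (pvPair m) := by
        rw [List.map_map]
        refine List.map_congr_left ?_
        intro z _
        simp [pvPair]
    _ = (((List.range m).filter (pvBig m)).reverse).map (pvPair m) := by rw [hX]

-- ===== VERDICT (by name: the statement is the Claim_ definition above) =====
theorem disjoint_subset_pairs_spec : Claim_equal_disjoint_subset_pairs := by
  intro mask _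
  unfold Spec_disjoint_subset_pairs
  by_cases h : mask ≤ 0
  · rw [disjoint_subset_pairs, PySem.List.pyRange_one_eq_nil (by omega : mask ≤ 1),
      List.foldl_nil, disjoint_subset_pairs_alt, if_pos h]
  · have hm : 0 < mask.toNat := by omega
    rw [show mask = ((mask.toNat : Nat) : Int) from by omega]
    rw [pvA_eq mask.toNat hm, pvB_eq mask.toNat hm, pv_bridge mask.toNat hm]
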